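-- pv_equiv track=rewrite | github.com/tonysebion/medallion-foundry | pipelines/lib/storage/s3.py | _glob_to_prefix_and_pattern
-- ===== SOURCE A (Python) =====
-- def _glob_to_prefix_and_pattern(glob_pattern: str) -> tuple:
--     """Convert glob pattern to S3 prefix and fnmatch pattern.
--
--     Example: 'bronze/system=retail/dt=*/data.parquet'
--     Returns: ('bronze/system=retail/dt=', '*/data.parquet')
--     """
--     # Find the first glob character
--     for i, char in enumerate(glob_pattern):
--         if char in "*?[":
--             # Split at the last / before the glob
--             prefix_end = glob_pattern.rfind("/", 0, i)
--             if prefix_end == -1: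
--                 return "", glob_pattern
--             return glob_pattern[: prefix_end + 1], glob_pattern[prefix_end + 1 :]
--     # No glob characters - return as prefix
--     return glob_pattern, ""
-- ===== SOURCE B (Python) =====
-- def _glob_to_prefix_and_pattern(glob_pattern: str) -> tuple:
--     """Convert glob pattern to S3 prefix and fnmatch pattern.
--
--     Tokenize on '/' and split at the first segment containing a glob char,
--     instead of scanning characters and rfind-ing the last slash.
--     """
--     segments = glob_pattern.split("/")
--     for idx, seg in enumerate(segments):
--         if any(ch in "*?[" for ch in seg):
--             prefix = "/".join(segments[:idx])
--             if idx > 0: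
--                 prefix += "/"
--             return prefix, "/".join(segments[idx:])
--     # No glob characters - return as prefix
--     return glob_pattern, ""
-- ===== Notes on version B (the rewrite author's own statement) =====
-- stated objective: alternative
-- what changed: Replaces the per-character scan with rfind-based back-scan by tokenizing the pattern into slash-separated segments and splitting at the first segment that contains a glob character, joining head and tail segments to build the result.
import Mathlib
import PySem

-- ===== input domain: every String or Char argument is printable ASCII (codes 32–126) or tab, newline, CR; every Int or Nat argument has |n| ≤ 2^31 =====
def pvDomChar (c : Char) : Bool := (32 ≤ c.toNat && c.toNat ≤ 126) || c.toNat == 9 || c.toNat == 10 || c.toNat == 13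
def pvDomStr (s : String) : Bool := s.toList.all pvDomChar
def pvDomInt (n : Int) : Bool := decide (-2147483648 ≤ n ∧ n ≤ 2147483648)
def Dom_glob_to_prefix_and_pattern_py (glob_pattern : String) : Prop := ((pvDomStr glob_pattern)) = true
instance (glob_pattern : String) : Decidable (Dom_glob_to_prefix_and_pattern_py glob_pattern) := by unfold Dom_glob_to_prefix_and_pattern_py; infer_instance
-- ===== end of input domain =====

-- B tokenizes the pattern into slash-separated segments and splits at the first glob-bearing
-- segment instead of A's char scan plus rfind; same value, different decomposition (alternative).

-- the character-class test `char in "*?["`, shared by both ports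
def pvIsGlobChar (c : Char) : Bool := PySem.Chars.isIn [c] ['*', '?', '[']

-- ===== PORT A =====
-- `for i, char in enumerate(glob_pattern): if char in "*?[": ...` with rfind and slices
def pvGlobScanA (s : List Char) : List (Int × Char) → List Char × List Char
  | [] => (s, [])
  | (i, c) :: rest =>
    if pvIsGlobChar c then
      let prefixEnd := PySem.Chars.rfindFrom s ['/'] 0 (some i)
      if prefixEnd = -1 then ([], s)
      else (PySem.Chars.slice s none (some (prefixEnd + 1)),
            PySem.Chars.slice s (some (prefixEnd + 1)) none)
    else pvGlobScanA s rest

def glob_to_prefix_and_pattern_py (glob_pattern : String) : String × String :=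
  let cs := glob_pattern.toList
  let r := pvGlobScanA cs (PySem.List.enumerate cs 0)
  (String.ofList r.1, String.ofList r.2)

-- ===== PORT B =====
-- `for idx, seg in enumerate(glob_pattern.split('/')): if any(ch in "*?[" for ch in seg): ...`
def pvSegScanB (s : List Char) (segments : List (List Char)) : List (Int × List Char) → List Char × List Char
  | [] => (s, [])
  | (idx, seg) :: rest =>
    if seg.any pvIsGlobChar then
      let pre := PySem.Chars.join ['/'] (PySem.List.slice segments none (some idx))
      let pre2 := if 0 < idx then pre ++ ['/'] else pre
      (pre2, PySem.Chars.join ['/'] (PySem.List.slice segments (some idx) none))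
    else pvSegScanB s segments rest

def glob_to_prefix_and_pattern_py_alt (glob_pattern : String) : String × String :=
  let cs := glob_pattern.toList
  let segments := PySem.Chars.splitOn cs ['/']
  let r := pvSegScanB cs segments (PySem.List.enumerate segments 0)
  (String.ofList r.1, String.ofList r.2)

-- ===== PRECONDITION & SPEC =====
def Spec_glob_to_prefix_and_pattern_py (glob_pattern : String) (out : String × String) : Prop := out = glob_to_prefix_and_pattern_py_alt glob_pattern
instance (glob_pattern : String) (out : String × String) : Decidable (Spec_glob_to_prefix_and_pattern_py glob_pattern out) := by unfold Spec_glob_to_prefix_and_pattern_py; infer_instance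

-- ===== CLAIM (what is proved, stated in full; the proofs are below) =====
def Claim_equal_glob_to_prefix_and_pattern_py : Prop := ∀ (glob_pattern : String), Dom_glob_to_prefix_and_pattern_py glob_pattern → Spec_glob_to_prefix_and_pattern_py glob_pattern (glob_to_prefix_and_pattern_py glob_pattern)

-- ===== LEMMAS AND PROOFS =====

-- Python split('/') as a structural recursion: pvSplitAux pre cs prepends pre to the first piece
def pvSplitAux (pre : List Char) : List Char → List (List Char)
  | [] => [pre]
  | c :: t => if c = '/' then pre :: pvSplitAux [] t else pvSplitAux (pre ++ [c]) t

-- greatest k ≤ j with t[k] = '/', else -1 (closed form of rfind.go for the needle "/")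
def pvLastSlash (t : List Char) : Nat → Int
  | 0 => if t[0]? = some '/' then 0 else -1
  | j+1 => if t[j+1]? = some '/' then ((j : Int)+1) else pvLastSlash t j

-- common reference shape over the segment list
def pvRefSegs : List (List Char) → List Char × List Char
  | [] => ([], [])
  | [seg] => if seg.any pvIsGlobChar then ([], seg) else (seg, [])
  | seg :: s2 :: rest =>
      if seg.any pvIsGlobChar then ([], PySem.Chars.join ['/'] (seg :: s2 :: rest))
      else
        ((seg ++ '/' :: (pvRefSegs (s2 :: rest)).1), (pvRefSegs (s2 :: rest)).2)

theorem pvLS_zero (t : List Char) : pvLastSlash t 0 = if t[0]? = some '/' then 0 else -1 := rfl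

theorem pvLS_succ (t : List Char) (j : Nat) :
    pvLastSlash t (j+1) = if t[j+1]? = some '/' then ((j : Int)+1) else pvLastSlash t j := rfl

theorem pvPrefixSlash (t : List Char) (k : Nat) :
    (['/'].isPrefixOf (t.drop k)) = (t[k]? == some '/') := by
  cases hd : t.drop k with
  | nil =>
    have h0 : t[k]? = none := by rw [← List.head?_drop, hd]; rfl
    simp [List.isPrefixOf, h0]
  | cons c r =>
    have h0 : t[k]? = some c := by rw [← List.head?_drop, hd]; rfl
    simp [List.isPrefixOf, h0, eq_comm]

theorem pvRgo (t : List Char) (j : Nat) :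
    PySem.Chars.rfind.go t ['/'] j = pvLastSlash t j := by
  induction j with
  | zero =>
    have h := pvPrefixSlash t 0
    simp only [List.drop_zero] at h
    simp only [PySem.Chars.rfind.go, pvLastSlash, h]
    split_ifs <;> simp_all
  | succ j ih =>
    have h := pvPrefixSlash t (j+1)
    simp only [PySem.Chars.rfind.go, pvLastSlash, h, ih]
    split_ifs <;> simp_all

theorem pvRfindChar (t : List Char) :
    PySem.Chars.rfind t ['/'] = pvLastSlash t t.length := by
  rw [PySem.Chars.rfind, pvRgo]

theorem pvRFF (t : List Char) (m : Nat) (hm : m ≤ t.length) :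
    PySem.Chars.rfindFrom t ['/'] 0 (some (m : Int)) = PySem.Chars.rfind (t.take m) ['/'] := by
  have h1 : ¬ ((t.length : Int) < (m : Int)) := by omega
  have h2 : ¬ ((m : Int) < (0 : Int)) := by omega
  have h3 : ¬ ((0 : Int) < (0 : Int)) := by omega
  simp only [PySem.Chars.rfindFrom, h1, h2, h3, if_false, Int.toNat_natCast,
    Int.toNat_zero, List.drop_zero]
  split_ifs <;> omega

theorem pvLSbounds (t : List Char) (j : Nat) :
    -1 ≤ pvLastSlash t j ∧ pvLastSlash t j ≤ (j : Int) := by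
  induction j with
  | zero => simp only [pvLastSlash]; split_ifs <;> simp
  | succ j ih => simp only [pvLastSlash]; split_ifs <;> push_cast <;> omega

theorem pvP1 (t : List Char) (j : Nat) (h : '/' ∉ t) : pvLastSlash t j = -1 := by
  induction j with
  | zero =>
    simp only [pvLastSlash]
    split_ifs with hg
    · exact absurd (List.mem_of_getElem? hg) h
    · rfl
  | succ j ih =>
    simp only [pvLastSlash]
    split_ifs with hg
    · exact absurd (List.mem_of_getElem? hg) h
    · exact ih

theorem pvLSleft (a b : List Char) (j : Nat) (hj : j < a.length) :
    pvLastSlash (a ++ b) j = pvLastSlash a j := by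
  induction j with
  | zero =>
    have h0 : (a ++ b)[0]? = a[0]? := List.getElem?_append_left hj
    simp [pvLastSlash, h0]
  | succ j ih =>
    have h0 : (a ++ b)[j+1]? = a[j+1]? := List.getElem?_append_left hj
    simp only [pvLastSlash, h0]
    split_ifs
    · rfl
    · exact ih (by omega)

theorem pvLSapp (a b : List Char) (j : Nat) :
    pvLastSlash (a ++ b) (a.length + j) =
      if pvLastSlash b j = -1 then pvLastSlash a (a.length - 1)
      else (a.length : Int) + pvLastSlash b j := by
  induction j with
  | zero =>
    cases a with
    | nil =>
      simp only [List.nil_append, List.length_nil, Nat.add_zero, Nat.zero_sub]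
      have hnil : pvLastSlash ([] : List Char) 0 = -1 := by rw [pvLS_zero]; simp
      split_ifs with h
      · rw [hnil]; exact h
      · omega
    | cons x a' =>
      have hlen : (x :: a').length + 0 = a'.length + 1 := by simp
      rw [hlen, pvLS_succ]
      have hget : ((x :: a') ++ b)[a'.length + 1]? = b[0]? := by
        rw [List.getElem?_append_right (by simp)]
        simp
      rw [hget]
      have hsub : (x :: a').length - 1 = a'.length := by simp
      rw [hsub]
      by_cases h1 : b[0]? = some '/'
      · rw [if_pos h1]
        have hb : pvLastSlash b 0 = 0 := by rw [pvLS_zero, if_pos h1]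
        rw [hb, if_neg (by omega : ¬ (0:Int) = -1)]
        simp
      · rw [if_neg h1]
        have hb : pvLastSlash b 0 = -1 := by rw [pvLS_zero, if_neg h1]
        rw [hb, if_pos rfl]
        exact pvLSleft (x :: a') b a'.length (by simp)
  | succ j ih =>
    have hre : a.length + (j+1) = (a.length + j) + 1 := by omega
    rw [hre, pvLS_succ]
    have hget : (a ++ b)[a.length + j + 1]? = b[j+1]? := by
      rw [List.getElem?_append_right (by omega)]
      congr 1
      omega
    rw [hget, pvLS_succ b j]
    by_cases h1 : b[j+1]? = some '/'
    · rw [if_pos h1, if_pos h1, if_neg (by omega : ¬ ((j : Int)+1) = -1)]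
      push_cast
      ring
    · rw [if_neg h1, if_neg h1]
      exact ih

theorem pvLSlast (seg : List Char) :
    pvLastSlash (seg ++ ['/']) seg.length = (seg.length : Int) := by
  have hget : (seg ++ ['/'])[seg.length]? = some '/' := by
    rw [List.getElem?_append_right (le_refl _)]; simp
  cases hs : seg.length with
  | zero =>
    have hseg : seg = [] := List.length_eq_zero_iff.mp hs
    subst hseg
    decide
  | succ m =>
    rw [hs] at hget
    rw [pvLS_succ, hget, if_pos rfl]
    push_cast
    ring

-- splitOn.go fuel elimination
theorem pvGo (fuel : Nat) : ∀ (l cur : List Char) (acc : List (List Char)), l.length < fuel →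
    PySem.Chars.splitOn.go ['/'] fuel l cur acc = acc.reverse ++ pvSplitAux cur.reverse l := by
  induction fuel with
  | zero => intro l cur acc h; omega
  | succ fuel ih =>
    intro l cur acc h
    cases l with
    | nil => simp [PySem.Chars.splitOn.go, pvSplitAux]
    | cons c rest =>
      by_cases hc : c = '/'
      · subst hc
        have hp : (['/'].isPrefixOf ('/' :: rest)) = true := by simp [List.isPrefixOf]
        simp only [PySem.Chars.splitOn.go, hp, if_true]
        have hdrop : List.drop (['/'] : List Char).length ('/' :: rest) = rest := rfl
        rw [hdrop, ih rest [] ((List.reverse cur) :: acc) (by simp at h ⊢; omega)]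
        simp [pvSplitAux]
      · have hp : (['/'].isPrefixOf (c :: rest)) = false := by
          simp [List.isPrefixOf]
          exact fun h' => absurd h'.symm hc
        simp only [PySem.Chars.splitOn.go, hp, Bool.false_eq_true, if_false]
        rw [ih rest (c :: cur) acc (by simp at h ⊢; omega)]
        simp [pvSplitAux, hc]

theorem pvSO (cs : List Char) : PySem.Chars.splitOn cs ['/'] = pvSplitAux [] cs := by
  rw [PySem.Chars.splitOn, pvGo (cs.length + 1) cs [] [] (by omega)]
  simp

theorem pvSAne (pre cs : List Char) : pvSplitAux pre cs ≠ [] := by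
  induction cs generalizing pre with
  | nil => simp [pvSplitAux]
  | cons c t ih => simp only [pvSplitAux]; split_ifs <;> simp_all

theorem pvSAjoin (cs : List Char) : ∀ pre, PySem.Chars.join ['/'] (pvSplitAux pre cs) = pre ++ cs := by
  induction cs with
  | nil => intro pre; simp [pvSplitAux, PySem.Chars.join_singleton]
  | cons c t ih =>
    intro pre
    simp only [pvSplitAux]
    split_ifs with hc
    · subst hc
      obtain ⟨q, rest, hq⟩ : ∃ q rest, pvSplitAux ([] : List Char) t = q :: rest := by
        cases h : pvSplitAux ([] : List Char) t with
        | nil => exact absurd h (pvSAne [] t)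
        | cons q rest => exact ⟨q, rest, rfl⟩
      rw [hq, PySem.Chars.join_cons_cons]
      have hj := ih []
      rw [hq] at hj
      rw [hj]
      simp
    · rw [ih (pre ++ [c])]; simp

theorem pvSA1 (cs : List Char) : ∀ pre, '/' ∉ cs → pvSplitAux pre cs = [pre ++ cs] := by
  induction cs with
  | nil => intro pre _; simp [pvSplitAux]
  | cons c t ih =>
    intro pre h
    simp only [pvSplitAux]
    have hc : c ≠ '/' := fun hc => h (hc ▸ List.mem_cons_self)
    rw [if_neg hc, ih (pre ++ [c]) (fun hm => h (List.mem_cons_of_mem _ hm))]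
    simp

theorem pvSA2 (seg : List Char) : ∀ (pre tl : List Char), '/' ∉ seg →
    pvSplitAux pre (seg ++ '/' :: tl) = (pre ++ seg) :: pvSplitAux [] tl := by
  induction seg with
  | nil => intro pre tl _; simp [pvSplitAux]
  | cons c s ih =>
    intro pre tl h
    have hc : c ≠ '/' := fun hc => h (hc ▸ List.mem_cons_self)
    simp only [List.cons_append, pvSplitAux, if_neg hc]
    rw [ih (pre ++ [c]) tl (fun hm => h (List.mem_cons_of_mem _ hm))]
    simp

-- first glob char decomposition
theorem pvFirstGlob (u : List Char) (h : u.any pvIsGlobChar = true) :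
    ∃ p c q, u = p ++ c :: q ∧ pvIsGlobChar c = true ∧ (∀ x ∈ p, pvIsGlobChar x = false) := by
  induction u with
  | nil => simp at h
  | cons c t ih =>
    by_cases hc : pvIsGlobChar c
    · exact ⟨[], c, t, rfl, hc, by simp⟩
    · have ht : t.any pvIsGlobChar = true := by
        simp only [List.any_cons, hc] at h
        simpa using h
      obtain ⟨p, d, q, h1, h2, h3⟩ := ih ht
      refine ⟨c :: p, d, q, by simp [h1], h2, ?_⟩
      intro x hx
      rcases List.mem_cons.mp hx with hx | hx
      · rw [hx]; simpa using hc
      · exact h3 x hx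

theorem pvDropHead (l : List Char) (d : Char) (t : List Char)
    (h : l.dropWhile (fun c => c ≠ '/') = d :: t) : d = '/' := by
  induction l with
  | nil => simp at h
  | cons c r ih =>
    rw [List.dropWhile_cons] at h
    by_cases hc : c = '/'
    · rw [if_neg (by simp [hc])] at h
      injection h with h1 _
      exact h1 ▸ hc
    · rw [if_pos (by simpa using hc)] at h
      exact ih h

-- skipping a stretch of glob-free characters
theorem pvSkipChars (s : List Char) (u : List Char) (e2 : List (Int × Char)) :
    ∀ (s0 : Int), (∀ c ∈ u, pvIsGlobChar c = false) →
    pvGlobScanA s (PySem.List.enumerate u s0 ++ e2) = pvGlobScanA s e2 := by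
  induction u with
  | nil => intro s0 _; simp [PySem.List.enumerate_nil]
  | cons c t ih =>
    intro s0 h
    rw [PySem.List.enumerate_cons]
    have hc : pvIsGlobChar c = false := h c List.mem_cons_self
    simp only [List.cons_append, pvGlobScanA, hc, Bool.false_eq_true, if_false]
    exact ih (s0 + 1) (fun x hx => h x (List.mem_cons_of_mem _ hx))

theorem pvScanAllFalse (s : List Char) (u : List Char) (s0 : Int)
    (h : ∀ c ∈ u, pvIsGlobChar c = false) :
    pvGlobScanA s (PySem.List.enumerate u s0) = (s, []) := by
  rw [← List.append_nil (PySem.List.enumerate u s0), pvSkipChars s u [] s0 h]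
  simp [pvGlobScanA]

-- compositional step for A: scanning the tail of seg ++ '/' :: tl from global offset seg.length+1+k
theorem pvLA (tl seg : List Char) : ∀ (n k : Nat), tl.length - k ≤ n → k ≤ tl.length →
    pvGlobScanA (seg ++ '/' :: tl) (PySem.List.enumerate (tl.drop k) ((seg.length + 1 + k : Nat) : Int))
    = (seg ++ '/' :: (pvGlobScanA tl (PySem.List.enumerate (tl.drop k) ((k : Nat) : Int))).1,
       (pvGlobScanA tl (PySem.List.enumerate (tl.drop k) ((k : Nat) : Int))).2) := by
  intro n
  induction n with
  | zero =>
    intro k h1 h2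
    have hnil : tl.drop k = [] := List.drop_eq_nil_of_le (by omega)
    simp [hnil, PySem.List.enumerate_nil, pvGlobScanA]
  | succ n ih =>
    intro k h1 h2
    cases hd : tl.drop k with
    | nil => simp [PySem.List.enumerate_nil, pvGlobScanA]
    | cons c rest =>
      have hk : k < tl.length := by
        by_contra hh
        rw [List.drop_eq_nil_of_le (by omega)] at hd
        simp at hd
      have hrest : tl.drop (k+1) = rest := by
        rw [← List.drop_drop, hd]
        rfl
      rw [PySem.List.enumerate_cons, PySem.List.enumerate_cons]
      by_cases hc : pvIsGlobChar c
      · -- glob found: global index seg.length+1+k, local index k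
        have hlk : (tl.take k).length = k := by simp; omega
        have hinner : PySem.Chars.rfindFrom tl ['/'] 0 (some ((k : Nat) : Int))
            = pvLastSlash (tl.take k) k := by
          rw [pvRFF tl k (le_of_lt hk), pvRfindChar, hlk]
        have hcs : seg ++ '/' :: tl = (seg ++ ['/']) ++ tl := by simp
        have e1 : List.take (seg.length + 1 + k) (seg ++ ['/']) = seg ++ ['/'] :=
          List.take_of_length_le (by simp)
        have e2 : seg.length + 1 + k - (seg ++ ['/']).length = k := by simp
        have htake : ((seg ++ ['/']) ++ tl).take (seg.length + 1 + k)
            = (seg ++ ['/']) ++ tl.take k := by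
          rw [List.take_append, e1, e2]
        have hlen2 : ((seg ++ ['/']) ++ tl.take k).length = (seg ++ ['/']).length + k := by
          simp
          omega
        have hsub : (seg ++ ['/']).length - 1 = seg.length := by simp
        have houter : PySem.Chars.rfindFrom ((seg ++ ['/']) ++ tl) ['/'] 0 (some ((seg.length + 1 + k : Nat) : Int))
            = if pvLastSlash (tl.take k) k = -1 then (seg.length : Int)
              else ((seg ++ ['/']).length : Int) + pvLastSlash (tl.take k) k := by
          rw [pvRFF _ (seg.length + 1 + k) (by simp; omega), htake, pvRfindChar, hlen2,
              pvLSapp (seg ++ ['/']) (tl.take k) k, hsub, pvLSlast]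
        by_cases hin : pvLastSlash (tl.take k) k = -1
        · have hX : pvGlobScanA tl ((((k : Nat) : Int), c) :: PySem.List.enumerate rest (((k : Nat) : Int) + 1))
              = ([], tl) := by
            simp only [pvGlobScanA, hc, if_true, hinner, hin]
          rw [hX]
          simp only [pvGlobScanA, hc, if_true]
          rw [hcs, houter, if_pos hin, if_neg (by omega : ¬ ((seg.length : Int)) = -1)]
          rw [PySem.Chars.slice_eq_listSlice, PySem.Chars.slice_eq_listSlice,
              PySem.List.slice_to _ (by omega : (0:Int) ≤ (seg.length : Int) + 1),
              PySem.List.slice_from _ (by omega : (0:Int) ≤ (seg.length : Int) + 1)]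
          have htn : ((seg.length : Int) + 1).toNat = (seg ++ ['/']).length := by simp
          rw [htn, List.take_left, List.drop_left]
        · have hpos : 0 ≤ pvLastSlash (tl.take k) k := by
            have hb := pvLSbounds (tl.take k) k
            omega
          have hne : ¬ (((seg ++ ['/']).length : Int) + pvLastSlash (tl.take k) k = -1) := by
            omega
          have hX : pvGlobScanA tl ((((k : Nat) : Int), c) :: PySem.List.enumerate rest (((k : Nat) : Int) + 1))
              = (List.take (pvLastSlash (tl.take k) k + 1).toNat tl,
                 List.drop (pvLastSlash (tl.take k) k + 1).toNat tl) := by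
            simp only [pvGlobScanA, hc, if_true, hinner]
            rw [if_neg hin, PySem.Chars.slice_eq_listSlice, PySem.Chars.slice_eq_listSlice,
                PySem.List.slice_to _ (by omega : (0:Int) ≤ pvLastSlash (tl.take k) k + 1),
                PySem.List.slice_from _ (by omega : (0:Int) ≤ pvLastSlash (tl.take k) k + 1)]
          rw [hX]
          simp only [pvGlobScanA, hc, if_true]
          rw [hcs, houter, if_neg hin, if_neg hne]
          rw [PySem.Chars.slice_eq_listSlice, PySem.Chars.slice_eq_listSlice,
              PySem.List.slice_to _ (by omega : (0:Int) ≤ ((seg ++ ['/']).length : Int) + pvLastSlash (tl.take k) k + 1),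
              PySem.List.slice_from _ (by omega : (0:Int) ≤ ((seg ++ ['/']).length : Int) + pvLastSlash (tl.take k) k + 1)]
          have htn : ((((seg ++ ['/']).length : Int)) + pvLastSlash (tl.take k) k + 1).toNat
              = (seg ++ ['/']).length + (pvLastSlash (tl.take k) k + 1).toNat := by omega
          rw [htn]
          have e3 : List.take ((seg ++ ['/']).length + (pvLastSlash (tl.take k) k + 1).toNat) (seg ++ ['/'])
              = seg ++ ['/'] := List.take_of_length_le (by omega)
          have e4 : (seg ++ ['/']).length + (pvLastSlash (tl.take k) k + 1).toNat - (seg ++ ['/']).length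
              = (pvLastSlash (tl.take k) k + 1).toNat := by omega
          have e5 : List.drop ((seg ++ ['/']).length + (pvLastSlash (tl.take k) k + 1).toNat) (seg ++ ['/'])
              = [] := List.drop_eq_nil_of_le (by omega)
          rw [List.take_append, e3, e4, List.drop_append, e5, e4]
          simp
      · -- not a glob char: both loops skip this entry
        simp only [pvGlobScanA, hc, Bool.false_eq_true, if_false]
        have hc1 : ((seg.length + 1 + k : Nat) : Int) + 1 = ((seg.length + 1 + (k+1) : Nat) : Int) := by
          push_cast; ring
        have hc2 : ((k : Nat) : Int) + 1 = (((k+1) : Nat) : Int) := by push_cast; ring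
        rw [hc1, hc2, ← hrest]
        exact ih (k+1) (by omega) (by omega)

theorem pvLA0 (tl seg : List Char) :
    pvGlobScanA (seg ++ '/' :: tl) (PySem.List.enumerate tl ((seg.length : Int) + 1))
    = (seg ++ '/' :: (pvGlobScanA tl (PySem.List.enumerate tl 0)).1,
       (pvGlobScanA tl (PySem.List.enumerate tl 0)).2) := by
  have h := pvLA tl seg tl.length 0 (by omega) (by omega)
  push_cast at h
  simpa using h

-- the prefix-join identity used in B's glob branch
theorem pvJoinPre (seg : List Char) (segs' : List (List Char)) (k : Nat) (hk : k ≤ segs'.length) :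
    PySem.Chars.join ['/'] (seg :: segs'.take k) ++ ['/']
      = seg ++ '/' :: (if (0:Int) < ((k : Nat) : Int)
          then PySem.Chars.join ['/'] (segs'.take k) ++ ['/']
          else PySem.Chars.join ['/'] (segs'.take k)) := by
  cases htk : segs'.take k with
  | nil =>
    have hk0 : k = 0 := by
      by_contra hh
      have hl : (segs'.take k).length = k := by simp; omega
      rw [htk] at hl
      simp at hl
      omega
    subst hk0
    simp [PySem.Chars.join_singleton, PySem.Chars.join_nil]
  | cons q qs =>
    have hkpos : 0 < k := by
      by_contra hh
      have hk0 : k = 0 := by omega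
      subst hk0
      simp at htk
    rw [if_pos (by omega : (0:Int) < ((k : Nat) : Int)), PySem.Chars.join_cons_cons]
    simp

-- compositional step for B
theorem pvLB (segs' : List (List Char)) (tl seg : List Char) : ∀ (n k : Nat),
    segs'.length - k ≤ n → k ≤ segs'.length →
    pvSegScanB (seg ++ '/' :: tl) (seg :: segs') (PySem.List.enumerate (segs'.drop k) ((1 + k : Nat) : Int))
    = (seg ++ '/' :: (pvSegScanB tl segs' (PySem.List.enumerate (segs'.drop k) ((k : Nat) : Int))).1,
       (pvSegScanB tl segs' (PySem.List.enumerate (segs'.drop k) ((k : Nat) : Int))).2) := by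
  intro n
  induction n with
  | zero =>
    intro k h1 h2
    have hnil : segs'.drop k = [] := List.drop_eq_nil_of_le (by omega)
    simp [hnil, PySem.List.enumerate_nil, pvSegScanB]
  | succ n ih =>
    intro k h1 h2
    cases hd : segs'.drop k with
    | nil => simp [PySem.List.enumerate_nil, pvSegScanB]
    | cons sg rest =>
      have hk : k < segs'.length := by
        by_contra hh
        rw [List.drop_eq_nil_of_le (by omega)] at hd
        simp at hd
      have hrest : segs'.drop (k+1) = rest := by
        rw [← List.drop_drop, hd]
        rfl
      rw [PySem.List.enumerate_cons, PySem.List.enumerate_cons]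
      by_cases hg : sg.any pvIsGlobChar
      · simp only [pvSegScanB, hg, if_true]
        rw [if_pos (by omega : (0:Int) < ((1 + k : Nat) : Int))]
        rw [PySem.List.slice_to _ (by omega : (0:Int) ≤ ((1 + k : Nat) : Int)),
            PySem.List.slice_from _ (by omega : (0:Int) ≤ ((1 + k : Nat) : Int)),
            PySem.List.slice_to _ (by omega : (0:Int) ≤ ((k : Nat) : Int)),
            PySem.List.slice_from _ (by omega : (0:Int) ≤ ((k : Nat) : Int))]
        have ht1 : (((1 + k : Nat) : Int)).toNat = k + 1 := by omega
        have ht2 : (((k : Nat) : Int)).toNat = k := by omega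
        rw [ht1, ht2]
        have htake : (seg :: segs').take (k + 1) = seg :: segs'.take k := rfl
        have hdrop : (seg :: segs').drop (k + 1) = segs'.drop k := rfl
        rw [htake, hdrop, pvJoinPre seg segs' k (le_of_lt hk)]
      · simp only [pvSegScanB, hg, Bool.false_eq_true, if_false]
        have hc1 : ((1 + k : Nat) : Int) + 1 = ((1 + (k+1) : Nat) : Int) := by push_cast; ring
        have hc2 : ((k : Nat) : Int) + 1 = (((k+1) : Nat) : Int) := by push_cast; ring
        rw [hc1, hc2, ← hrest]
        exact ih (k+1) (by omega) (by omega)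

theorem pvLB0 (segs' : List (List Char)) (tl seg : List Char) :
    pvSegScanB (seg ++ '/' :: tl) (seg :: segs') (PySem.List.enumerate segs' ((0:Int) + 1))
    = (seg ++ '/' :: (pvSegScanB tl segs' (PySem.List.enumerate segs' 0)).1,
       (pvSegScanB tl segs' (PySem.List.enumerate segs' 0)).2) := by
  have h := pvLB segs' tl seg segs'.length 0 (by omega) (by omega)
  push_cast at h
  simpa using h

-- A's scan computes the reference
theorem pvTA (n : Nat) : ∀ cs : List Char, cs.length ≤ n →
    pvGlobScanA cs (PySem.List.enumerate cs 0) = pvRefSegs (pvSplitAux [] cs) := by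
  induction n with
  | zero =>
    intro cs h
    have hnil : cs = [] := List.length_eq_zero_iff.mp (by omega)
    subst hnil
    simp [pvSplitAux, pvRefSegs, pvGlobScanA, PySem.List.enumerate_nil]
  | succ n ih =>
    intro cs hlen
    have hcs : cs.takeWhile (fun c => c ≠ '/') ++ cs.dropWhile (fun c => c ≠ '/') = cs :=
      List.takeWhile_append_dropWhile
    have hnos : '/' ∉ cs.takeWhile (fun c => c ≠ '/') := by
      intro hm
      have := List.mem_takeWhile_imp hm
      simp at this
    by_cases hga : (cs.takeWhile (fun c => c ≠ '/')).any pvIsGlobChar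
    · -- a glob char occurs in the first segment: both sides give ([], cs)
      obtain ⟨p, c, q, h1, h2, h3⟩ := pvFirstGlob _ hga
      have hnp : '/' ∉ p := fun hm => hnos (h1 ▸ List.mem_append_left _ hm)
      have hcseq : cs = p ++ c :: (q ++ cs.dropWhile (fun c => c ≠ '/')) := by
        conv_lhs => rw [← hcs, h1]
        simp
      have hL : pvGlobScanA cs (PySem.List.enumerate cs 0) = ([], cs) := by
        conv_lhs => rw [hcseq]
        rw [PySem.List.enumerate_append, pvSkipChars _ _ _ _ h3, PySem.List.enumerate_cons]
        simp only [pvGlobScanA, h2, if_true]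
        have hz : (0:Int) + (p.length : Int) = ((p.length : Nat) : Int) := by omega
        rw [hz, pvRFF _ p.length (by simp), List.take_left, pvRfindChar,
            pvP1 p p.length hnp, if_pos rfl]
        rw [← hcseq]
      have hR : pvRefSegs (pvSplitAux [] cs) = ([], cs) := by
        cases hrd : cs.dropWhile (fun c => c ≠ '/') with
        | nil =>
          have hcseq2 : cs = cs.takeWhile (fun c => c ≠ '/') := by
            conv_lhs => rw [← hcs, hrd]
            simp
          have hznos : '/' ∉ cs := fun hm => hnos (hcseq2 ▸ hm)
          rw [pvSA1 cs [] hznos]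
          have hgc : cs.any pvIsGlobChar = true := by
            conv_lhs => rw [hcseq2]
            exact hga
          simp [pvRefSegs, hgc]
        | cons d tl =>
          have hd' : d = '/' := pvDropHead cs d tl hrd
          have hcs2 : cs = cs.takeWhile (fun c => c ≠ '/') ++ '/' :: tl := by
            conv_lhs => rw [← hcs, hrd, hd']
          have hsp : pvSplitAux [] cs = cs.takeWhile (fun c => c ≠ '/') :: pvSplitAux [] tl := by
            conv_lhs => rw [hcs2]
            rw [pvSA2 _ [] tl hnos]
            simp
          obtain ⟨qq, qs, hq⟩ : ∃ qq qs, pvSplitAux ([] : List Char) tl = qq :: qs := by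
            cases hsq : pvSplitAux ([] : List Char) tl with
            | nil => exact absurd hsq (pvSAne [] tl)
            | cons qq qs => exact ⟨qq, qs, rfl⟩
          have hjoin : PySem.Chars.join ['/'] (pvSplitAux [] cs) = cs := by
            rw [pvSAjoin cs []]
            simp
          rw [hsp, hq] at hjoin ⊢
          simp only [pvRefSegs, hga, if_true]
          rw [hjoin]
      rw [hL, hR]
    · -- first segment has no glob char
      have hgfalse : (cs.takeWhile (fun c => c ≠ '/')).any pvIsGlobChar = false := by
        simpa using hga
      cases hrd : cs.dropWhile (fun c => c ≠ '/') with
      | nil =>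
        have hcseq2 : cs = cs.takeWhile (fun c => c ≠ '/') := by
          conv_lhs => rw [← hcs, hrd]
          simp
        have hznos : '/' ∉ cs := fun hm => hnos (hcseq2 ▸ hm)
        have hallf : ∀ c ∈ cs, pvIsGlobChar c = false := by
          intro x hx
          have hx' : x ∈ cs.takeWhile (fun c => c ≠ '/') := hcseq2 ▸ hx
          simpa using List.any_eq_false.mp hgfalse x hx'
        rw [pvScanAllFalse cs cs 0 hallf, pvSA1 cs [] hznos]
        have hgc : cs.any pvIsGlobChar = false :=
          List.any_eq_false.mpr (fun x hx => by simp [hallf x hx])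
        simp [pvRefSegs, hgc]
      | cons d tl =>
        have hd' : d = '/' := pvDropHead cs d tl hrd
        have hcs2 : cs = cs.takeWhile (fun c => c ≠ '/') ++ '/' :: tl := by
          conv_lhs => rw [← hcs, hrd, hd']
        have hlt : tl.length ≤ n := by
          have := congrArg List.length hcs2
          simp at this
          omega
        have hsegf : ∀ x ∈ cs.takeWhile (fun c => c ≠ '/') ++ ['/'], pvIsGlobChar x = false := by
          intro x hx
          rcases List.mem_append.mp hx with hx | hx
          · simpa using List.any_eq_false.mp hgfalse x hx
          · simp at hx
            subst hx
            decide
        have hL : pvGlobScanA cs (PySem.List.enumerate cs 0)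
            = (cs.takeWhile (fun c => c ≠ '/') ++ '/' :: (pvGlobScanA tl (PySem.List.enumerate tl 0)).1,
               (pvGlobScanA tl (PySem.List.enumerate tl 0)).2) := by
          conv_lhs => rw [hcs2]
          have hsp : cs.takeWhile (fun c => c ≠ '/') ++ '/' :: tl
              = (cs.takeWhile (fun c => c ≠ '/') ++ ['/']) ++ tl := by simp
          conv_lhs => rw [hsp, PySem.List.enumerate_append]
          rw [pvSkipChars _ _ _ _ hsegf, ← hsp]
          have hz : (0:Int) + ((cs.takeWhile (fun c => c ≠ '/') ++ ['/']).length : Int)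
              = ((cs.takeWhile (fun c => c ≠ '/')).length : Int) + 1 := by simp
          rw [hz, pvLA0]
        rw [hL, ih tl hlt]
        have hsp2 : pvSplitAux [] cs = cs.takeWhile (fun c => c ≠ '/') :: pvSplitAux [] tl := by
          conv_lhs => rw [hcs2]
          rw [pvSA2 _ [] tl hnos]
          simp
        obtain ⟨qq, qs, hq⟩ : ∃ qq qs, pvSplitAux ([] : List Char) tl = qq :: qs := by
          cases hsq : pvSplitAux ([] : List Char) tl with
          | nil => exact absurd hsq (pvSAne [] tl)
          | cons qq qs => exact ⟨qq, qs, rfl⟩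
        rw [hsp2, hq]
        simp only [pvRefSegs, hgfalse, Bool.false_eq_true, if_false]

-- B's scan computes the reference
theorem pvTB (n : Nat) : ∀ cs : List Char, cs.length ≤ n →
    pvSegScanB cs (pvSplitAux [] cs) (PySem.List.enumerate (pvSplitAux [] cs) 0)
      = pvRefSegs (pvSplitAux [] cs) := by
  induction n with
  | zero =>
    intro cs h
    have hnil : cs = [] := List.length_eq_zero_iff.mp (by omega)
    subst hnil
    simp [pvSplitAux, pvRefSegs, pvSegScanB, PySem.List.enumerate_cons,
      PySem.List.enumerate_nil]
  | succ n ih =>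
    intro cs hlen
    have hcs : cs.takeWhile (fun c => c ≠ '/') ++ cs.dropWhile (fun c => c ≠ '/') = cs :=
      List.takeWhile_append_dropWhile
    have hnos : '/' ∉ cs.takeWhile (fun c => c ≠ '/') := by
      intro hm
      have := List.mem_takeWhile_imp hm
      simp at this
    cases hrd : cs.dropWhile (fun c => c ≠ '/') with
    | nil =>
      have hcseq2 : cs = cs.takeWhile (fun c => c ≠ '/') := by
        conv_lhs => rw [← hcs, hrd]
        simp
      have hznos : '/' ∉ cs := fun hm => hnos (hcseq2 ▸ hm)
      rw [pvSA1 cs [] hznos]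
      simp only [List.nil_append]
      rw [PySem.List.enumerate_cons, PySem.List.enumerate_nil]
      by_cases hgc : cs.any pvIsGlobChar
      · simp only [pvSegScanB, hgc, if_true]
        rw [if_neg (by omega : ¬ ((0:Int) < 0))]
        rw [PySem.List.slice_to _ (le_refl (0:Int)), PySem.List.slice_from _ (le_refl (0:Int))]
        simp [pvRefSegs, hgc, PySem.Chars.join_nil, PySem.Chars.join_singleton]
      · simp only [pvSegScanB, hgc, Bool.false_eq_true, if_false]
        simp [pvRefSegs, hgc]
    | cons d tl =>
      obtain ⟨sg, hsgdef⟩ : ∃ sg, cs.takeWhile (fun c => c ≠ '/') = sg := ⟨_, rfl⟩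
      rw [hsgdef] at hcs hnos
      have hd' : d = '/' := pvDropHead cs d tl hrd
      have hcs2 : cs = sg ++ '/' :: tl := by
        conv_lhs => rw [← hcs, hrd, hd']
      have hlt : tl.length ≤ n := by
        have := congrArg List.length hcs2
        simp at this
        omega
      have hsp : pvSplitAux [] cs = sg :: pvSplitAux [] tl := by
        conv_lhs => rw [hcs2]
        rw [pvSA2 _ [] tl hnos]
        simp
      obtain ⟨qq, qs, hq⟩ : ∃ qq qs, pvSplitAux ([] : List Char) tl = qq :: qs := by
        cases hsq : pvSplitAux ([] : List Char) tl with
        | nil => exact absurd hsq (pvSAne [] tl)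
        | cons qq qs => exact ⟨qq, qs, rfl⟩
      rw [hsp, PySem.List.enumerate_cons]
      by_cases hga : sg.any pvIsGlobChar
      · -- glob in first segment: both give ([], join of all segments)
        simp only [pvSegScanB, hga, if_true]
        rw [if_neg (by omega : ¬ ((0:Int) < 0))]
        rw [PySem.List.slice_to _ (le_refl (0:Int)), PySem.List.slice_from _ (le_refl (0:Int))]
        simp only [Int.toNat_zero, List.take_zero, List.drop_zero]
        rw [hq]
        simp only [pvRefSegs, hga, if_true]
        rw [PySem.Chars.join_nil]
      · -- no glob in first segment: skip it, recurse
        simp only [pvSegScanB, hga, Bool.false_eq_true, if_false]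
        conv_lhs => rw [hcs2]
        rw [pvLB0]
        have hihr := ih tl hlt
        rw [hq] at hihr ⊢
        rw [hihr]
        simp only [pvRefSegs, hga, Bool.false_eq_true, if_false]

-- ===== VERDICT (by name: the statement is the Claim_ definition above) =====
theorem glob_to_prefix_and_pattern_py_spec : Claim_equal_glob_to_prefix_and_pattern_py := by
  intro s _
  unfold Spec_glob_to_prefix_and_pattern_py glob_to_prefix_and_pattern_py glob_to_prefix_and_pattern_py_alt
  simp only
  rw [pvSO, pvTA s.toList.length s.toList le_rfl, pvTB s.toList.length s.toList le_rfl]
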